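-- pv_equiv track=rewrite | github.com/vocalpy/CMACBench | src/biosoundsegbench/prep/split.py | argsort_by_label_freq
-- ===== SOURCE A (Python) =====
-- import copy
-- import collections
--
-- def argsort_by_label_freq(
--         labels_lists: list[list[str]]
--         ) -> list[int]:
--     """Returns indices to sort a list of annotations
--      in order of more frequently appearing labels,
--      i.e., the first annotation will have the label
--      that appears least frequently and the last annotation
--      will have the label that appears most frequently.
--
--     Used to sort a dataframe representing a dataset of annotated audio
--     or spectrograms before cropping that dataset to a specified duration,
--     so that it's less likely that cropping will remove all occurrences
--     of any label class from the total dataset.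
--
--      Parameters
--      ----------
--      annots: list
--          List of list of strings, labels from :class:`crowsetta.Annotation` instances.
--
--      Returns
--      -------
--      sort_inds: list
--          Integer values to sort ``annots``.
--     """
--     all_labels = [lbl for labels_list in labels_lists for lbl in labels_list]
--     label_counts = collections.Counter(all_labels)
--
--     sort_inds = []
--     # make indices ahead of time so they stay constant as we remove things from the list
--     ind_labels_tuples = list(enumerate(copy.deepcopy(labels_lists)))
--     # starting with least common label, iterate through all labels list,
--     # and if a labels list contains that label, add the corresponding ind to sort inds
--     for label, _ in reversed(label_counts.most_common()):
--         # next line, [:] to make a temporary copy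
--         # so the list we're iterating through doesn't shorten out from underneath us
--         for ind_labels_tuple in ind_labels_tuples[:]:
--             ind, labels_list = ind_labels_tuple
--             if label in labels_list:
--                 sort_inds.append(ind)
--                 ind_labels_tuples.remove(ind_labels_tuple)
--
--     # make sure we got all source_paths + annots
--     if len(ind_labels_tuples) > 0:
--         # next line, [:] to make a temporary copy
--         # so the list we're iterating through doesn't shorten out from underneath us
--         for ind_labels_tuple in ind_labels_tuples[:]:
--             ind, _ = ind_labels_tuple
--             sort_inds.append(ind)
--             ind_labels_tuples.remove(ind_labels_tuple)
--
--     if len(ind_labels_tuples) > 0: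
--         raise ValueError(
--             "Not all ``labels_lists`` were used in sorting."
--             f"Left over (with indices from list): {ind_labels_tuples}"
--         )
--
--     if not (sorted(sort_inds) == list(range(len(labels_lists)))):
--         raise ValueError(
--             "sorted(sort_inds) does not equal range(len(labels)):"
--             f"sort_inds: {sort_inds}\nrange(len(annots)): {list(range(len(labels_lists)))}"
--         )
--
--     return sort_inds
-- ===== SOURCE B (Python) =====
-- import collections
--
--
-- def argsort_by_label_freq(
--         labels_lists: list[list[str]]
--         ) -> list[int]:
--     """Bucket-sort re-implementation: rank each label by the reversed
--     most-common order, key each list by its minimal label rank, and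
--     concatenate rank buckets; O(T + N + L) instead of A's nested scans."""
--     counts = collections.Counter(
--         lbl for labels_list in labels_lists for lbl in labels_list)
--     order = [lbl for lbl, _ in counts.most_common()][::-1]
--     rank = {lbl: r for r, lbl in enumerate(order)}
--     big = len(order)
--     buckets = [[] for _ in range(big + 1)]
--     for i, labels_list in enumerate(labels_lists):
--         k = min((rank[lbl] for lbl in labels_list), default=big)
--         buckets[k].append(i)
--     return [i for bucket in buckets for i in bucket]
-- ===== Notes on version B (the rewrite author's own statement) =====
-- stated objective: faster
-- what changed: Replaces A's repeated scan-and-remove passes over the remaining annotation lists (one pass per label, with list.remove inside) by a single bucket pass: rank labels by the reversed most-common order once, key each list by its minimal label rank, drop each index into its rank bucket and concatenate the buckets.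
import Mathlib
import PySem

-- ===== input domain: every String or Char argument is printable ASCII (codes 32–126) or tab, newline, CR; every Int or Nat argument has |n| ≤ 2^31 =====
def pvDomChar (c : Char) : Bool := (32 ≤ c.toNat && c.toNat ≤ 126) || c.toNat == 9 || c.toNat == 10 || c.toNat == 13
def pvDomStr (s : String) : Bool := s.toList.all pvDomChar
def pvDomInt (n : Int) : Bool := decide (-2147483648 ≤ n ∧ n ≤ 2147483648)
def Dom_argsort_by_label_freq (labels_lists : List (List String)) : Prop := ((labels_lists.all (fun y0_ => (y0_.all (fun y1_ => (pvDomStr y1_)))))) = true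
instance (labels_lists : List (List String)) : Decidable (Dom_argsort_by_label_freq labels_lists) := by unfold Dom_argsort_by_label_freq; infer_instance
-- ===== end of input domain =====

-- B replaces A's per-label scan-and-remove passes by one bucket pass keyed on each list's minimal label rank (same return value, different algorithm).

-- ===== PORT A =====
-- A's two ValueError checks are provably unreachable (the drain loop empties the
-- remaining tuples and sort_inds is a permutation of range(len) by construction),
-- so Python A always returns normally; the port returns sort_inds directly.
def argsort_by_label_freq (labels_lists : List (List String)) : List Int :=
  let all_labels : List String := labels_lists.flatMap (fun labels_list => labels_list)
  let label_counts := PySem.Dict.counter all_labels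
  let ind_labels_tuples : List (Int × List String) := PySem.List.enumerate labels_lists
  -- for label, _ in reversed(label_counts.most_common()):  (most_common() = sorted by count, reverse=True)
  let st :=
    ((PySem.List.sorted label_counts.items (fun p => p.2) true).reverse).foldl
      (fun st lp =>
        -- for ind_labels_tuple in ind_labels_tuples[:]:  (iterate a copy, remove from the live list)
        st.2.foldl
          (fun st' t =>
            if lp.1 ∈ t.2 then
              -- remove? always succeeds here (the tuples are distinct and t is still present)
              (st'.1 ++ [t.1], (PySem.List.remove? st'.2 t).getD st'.2)
            else st')
          (st.1, st.2))
      (([] : List Int), ind_labels_tuples)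
  -- leftover loop: for ind_labels_tuple in ind_labels_tuples[:]: append ind; remove
  let st2 :=
    st.2.foldl (fun st' t => (st'.1 ++ [t.1], (PySem.List.remove? st'.2 t).getD st'.2)) (st.1, st.2)
  st2.1

-- ===== PORT B =====
def argsort_by_label_freq_alt (labels_lists : List (List String)) : List Int :=
  let counts := PySem.Dict.counter (labels_lists.flatMap (fun labels_list => labels_list))
  let order : List String :=
    ((PySem.List.sorted counts.items (fun p => p.2) true).map (fun p => p.1)).reverse
  let rank : PySem.Dict String Int :=
    (PySem.List.enumerate order).foldl (fun d p => d.insert p.2 p.1) PySem.Dict.empty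
  let big : Int := (order.length : Int)
  let buckets0 : List (List Int) := List.replicate (order.length + 1) []
  let buckets :=
    (PySem.List.enumerate labels_lists).foldl
      (fun b p =>
        let k := (PySem.List.min? (p.2.map (fun lbl => rank.getD lbl big)) (fun x => x)).getD big
        -- k is a rank, hence 0 ≤ k ≤ big: buckets[k] with a nonnegative Python index
        b.modify k.toNat (fun bs => bs ++ [p.1]))
      buckets0
  buckets.flatten

-- ===== PRECONDITION & SPEC =====
def Spec_argsort_by_label_freq (labels_lists : List (List String)) (out : List Int) : Prop := out = argsort_by_label_freq_alt labels_lists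
instance (labels_lists : List (List String)) (out : List Int) : Decidable (Spec_argsort_by_label_freq labels_lists out) := by unfold Spec_argsort_by_label_freq; infer_instance

-- ===== CLAIM (what is proved, stated in full; the proofs are below) =====
def Claim_equal_argsort_by_label_freq : Prop := ∀ (labels_lists : List (List String)), Dom_argsort_by_label_freq labels_lists → Spec_argsort_by_label_freq labels_lists (argsort_by_label_freq labels_lists)

-- ===== LEMMAS AND PROOFS =====

-- the reversed most-common label order both programs compute
def pvOrder (labels_lists : List (List String)) : List String :=
  ((PySem.List.sorted (PySem.Dict.counter (labels_lists.flatMap (fun labels_list => labels_list))).items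
      (fun p => p.2) true).map (fun p => p.1)).reverse

-- position of the first label of R that occurs in ll (R.length if none)
def pvKey (R : List String) (ll : List String) : Nat :=
  match R with
  | [] => 0
  | l :: R' => if l ∈ ll then 0 else pvKey R' ll + 1

-- the indices A's outer loop emits, label group by label group
def pvEmit (R : List String) (ps : List (Int × List String)) : List Int :=
  match R with
  | [] => []
  | l :: R' =>
      (ps.filter (fun t => decide (l ∈ t.2))).map (·.1)
        ++ pvEmit R' (ps.filter (fun t => decide (l ∉ t.2)))

-- the common canonical value: indices grouped by key, keys ascending
def pvCanon (labels_lists : List (List String)) : List Int :=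
  (List.range ((pvOrder labels_lists).length + 1)).flatMap
    (fun r => ((PySem.List.enumerate labels_lists).filter
        (fun t => decide (pvKey (pvOrder labels_lists) t.2 = r))).map (·.1))

lemma pvKey_le (R : List String) (ll : List String) : pvKey R ll ≤ R.length := by
  induction R with
  | nil => simp [pvKey]
  | cons l R' ih =>
      simp only [pvKey, List.length_cons]
      split
      · omega
      · omega

lemma pvKey_eq_length_iff (R : List String) (ll : List String) :
    pvKey R ll = R.length ↔ ∀ l ∈ R, l ∉ ll := by
  induction R with
  | nil => simp [pvKey]
  | cons l R' ih =>
      simp only [pvKey, List.length_cons, List.mem_cons]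
      split
      · rename_i h
        constructor
        · omega
        · intro hall; exact absurd h (hall l (Or.inl rfl))
      · rename_i h
        constructor
        · intro he x hx
          rcases hx with rfl | hx
          · exact h
          · exact (ih.mp (by omega)) x hx
        · intro hall
          have := ih.mpr (fun x hx => hall x (Or.inr hx))
          omega

lemma pvKey_le_idxOf (R : List String) (ll : List String) (l : String) (hl : l ∈ ll) :
    pvKey R ll ≤ R.idxOf l := by
  induction R with
  | nil => simp [pvKey]
  | cons x R' ih =>
      simp only [pvKey]
      split
      · omega
      · rename_i hx
        have hne : x ≠ l := fun e => hx (e ▸ hl)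
        rw [List.idxOf_cons_ne _ hne]
        omega

lemma pvKey_witness (R : List String) (ll : List String)
    (h : ∀ l ∈ ll, l ∈ R) (hne : ll ≠ []) : ∃ l ∈ ll, R.idxOf l = pvKey R ll := by
  induction R with
  | nil =>
      obtain ⟨l, hl⟩ := List.exists_mem_of_ne_nil ll hne
      exact absurd (h l hl) (by simp)
  | cons x R' ih =>
      by_cases hx : x ∈ ll
      · exact ⟨x, hx, by simp [pvKey, hx]⟩
      · have h' : ∀ l ∈ ll, l ∈ R' := by
          intro l hl
          rcases List.mem_cons.mp (h l hl) with rfl | h1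
          · exact absurd hl hx
          · exact h1
        obtain ⟨l, hl, heq⟩ := ih h'
        have hne' : x ≠ l := fun e => hx (e ▸ hl)
        exact ⟨l, hl, by rw [List.idxOf_cons_ne _ hne']; simp [pvKey, hx, heq]⟩

-- A's inner loop (fold over a copy, removing from the live list)
lemma pv_inner (l : String) :
    ∀ (c kept : List (Int × List String)) (si : List Int), (kept ++ c).Nodup →
      c.foldl
        (fun st' t =>
          if l ∈ t.2 then (st'.1 ++ [t.1], (PySem.List.remove? st'.2 t).getD st'.2) else st')
        (si, kept ++ c)
      = (si ++ (c.filter (fun t => decide (l ∈ t.2))).map (·.1),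
         kept ++ c.filter (fun t => decide (l ∉ t.2))) := by
  intro c
  induction c with
  | nil => intro kept si h; simp
  | cons t c' ih =>
      intro kept si h
      have htk : t ∉ kept := fun hm => (List.nodup_append.mp h).2.2 t hm t List.mem_cons_self rfl
      by_cases hl : l ∈ t.2
      · have hrem : PySem.List.remove? (kept ++ t :: c') t = some (kept ++ c') := by
          rw [PySem.List.remove?_eq_some_erase _ t (by simp)]
          rw [List.erase_append_right _ htk, List.erase_cons_head]
        simp only [List.foldl_cons]
        rw [if_pos hl, hrem]
        have h' : (kept ++ c').Nodup :=
          List.Nodup.sublist ((List.sublist_cons_self t c').append_left kept) h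
        simp only [Option.getD_some]
        rw [ih kept (si ++ [t.1]) h']
        simp [hl]
      · simp only [List.foldl_cons, if_neg hl]
        have h' : ((kept ++ [t]) ++ c').Nodup := by simpa [List.append_assoc] using h
        have := ih (kept ++ [t]) si h'
        rw [List.append_assoc] at this
        simp only [List.cons_append, List.nil_append] at this
        rw [this]
        simp [hl, List.append_assoc]

-- A's leftover loop
lemma pv_drain :
    ∀ (c kept : List (Int × List String)) (si : List Int), (kept ++ c).Nodup →
      c.foldl (fun st' t => (st'.1 ++ [t.1], (PySem.List.remove? st'.2 t).getD st'.2))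
        (si, kept ++ c)
      = (si ++ c.map (·.1), kept) := by
  intro c
  induction c with
  | nil => intro kept si h; simp
  | cons t c' ih =>
      intro kept si h
      have htk : t ∉ kept := fun hm => (List.nodup_append.mp h).2.2 t hm t List.mem_cons_self rfl
      have hrem : PySem.List.remove? (kept ++ t :: c') t = some (kept ++ c') := by
        rw [PySem.List.remove?_eq_some_erase _ t (by simp)]
        rw [List.erase_append_right _ htk, List.erase_cons_head]
      simp only [List.foldl_cons, hrem, Option.getD_some]
      have h' : (kept ++ c').Nodup :=
        List.Nodup.sublist ((List.sublist_cons_self t c').append_left kept) h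
      rw [ih kept (si ++ [t.1]) h']
      simp

-- A's outer loop over the label order R
lemma pv_outer :
    ∀ (R : List String) (ps : List (Int × List String)) (si : List Int), ps.Nodup →
      R.foldl
        (fun st l =>
          st.2.foldl
            (fun st' t =>
              if l ∈ t.2 then (st'.1 ++ [t.1], (PySem.List.remove? st'.2 t).getD st'.2) else st')
            (st.1, st.2))
        (si, ps)
      = (si ++ pvEmit R ps, ps.filter (fun t => decide (pvKey R t.2 = R.length))) := by
  intro R
  induction R with
  | nil =>
      intro ps si h
      simp [pvEmit, pvKey]
  | cons l R' ih =>
      intro ps si h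
      rw [List.foldl_cons]
      have hin := pv_inner l ps [] si (by simpa using h)
      simp only [List.nil_append] at hin
      rw [hin]
      have h' : (ps.filter (fun t => decide (l ∉ t.2))).Nodup := h.filter _
      rw [ih _ _ h']
      rw [List.filter_filter]
      simp only [Prod.mk.injEq]
      constructor
      · simp [pvEmit]
      · apply List.filter_congr
        intro t ht
        by_cases hl : l ∈ t.2
        · simp [pvKey, hl]
        · simp [pvKey, hl]

-- A's outer loop as it appears in the port: folding over (label, count) pairs
lemma pv_outer' (Rp : List (String × Int)) (ps : List (Int × List String)) (si : List Int)
    (h : ps.Nodup) :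
    Rp.foldl
      (fun st lp =>
        st.2.foldl
          (fun st' t =>
            if lp.1 ∈ t.2 then (st'.1 ++ [t.1], (PySem.List.remove? st'.2 t).getD st'.2) else st')
          (st.1, st.2))
      (si, ps)
    = (si ++ pvEmit (Rp.map (·.1)) ps,
       ps.filter (fun t => decide (pvKey (Rp.map (·.1)) t.2 = (Rp.map (·.1)).length))) := by
  have := pv_outer (Rp.map (·.1)) ps si h
  rwa [List.foldl_map] at this

lemma pvEmit_eq_flatMap (R : List String) :
    ∀ ps : List (Int × List String),
      pvEmit R ps
      = (List.range R.length).flatMap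
          (fun r => (ps.filter (fun t => decide (pvKey R t.2 = r))).map (·.1)) := by
  induction R with
  | nil => intro ps; simp [pvEmit]
  | cons l R' ih =>
      intro ps
      rw [List.length_cons, List.range_succ_eq_map, List.flatMap_cons, List.flatMap_map]
      simp only [pvEmit]
      congr 1
      · apply congrArg
        apply List.filter_congr
        intro t ht
        by_cases hl : l ∈ t.2 <;> simp [pvKey, hl]
      · rw [ih]
        apply List.flatMap_congr
        intro r hr
        apply congrArg
        rw [List.filter_filter]
        apply List.filter_congr
        intro t ht
        by_cases hl : l ∈ t.2 <;> simp [pvKey, hl]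

-- B's bucket fold
lemma pv_buckets (k : Int × List String → Nat) :
    ∀ (xs : List (Int × List String)) (B0 : List (List Int)), (∀ t ∈ xs, k t < B0.length) →
      xs.foldl (fun b t => b.modify (k t) (fun bs => bs ++ [t.1])) B0
      = (List.range B0.length).map
          (fun r => B0.getD r [] ++ (xs.filter (fun t => decide (k t = r))).map (·.1)) := by
  intro xs
  induction xs with
  | nil =>
      intro B0 hb
      apply List.ext_getElem
      · simp
      · intro i h1 h2
        simp [List.getD_eq_getElem?_getD, List.getElem?_eq_getElem (by simpa using h2)]
  | cons t xs' ih =>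
      intro B0 hb
      rw [List.foldl_cons]
      rw [ih _ (fun u hu => by rw [List.length_modify]; exact hb u (List.mem_cons_of_mem t hu))]
      rw [List.length_modify]
      apply List.map_congr_left
      intro r hr
      have hget : (B0.modify (k t) (fun bs => bs ++ [t.1])).getD r []
          = if k t = r then B0.getD r [] ++ [t.1] else B0.getD r [] := by
        rw [List.getD_eq_getElem?_getD, List.getD_eq_getElem?_getD, List.getElem?_modify]
        by_cases he : k t = r
        · subst he
          rw [List.getElem?_eq_getElem (hb t List.mem_cons_self)]
          simp
        · simp [he]
      rw [hget]
      by_cases he : k t = r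
      · simp [he, List.append_assoc]
      · simp [he]

-- B's rank dict is idxOf into the label order
lemma pv_rank_notmem (dflt : Int) :
    ∀ (R : List String) (s : Int) (d : PySem.Dict String Int) (l : String), l ∉ R →
      ((PySem.List.enumerate R s).foldl (fun d p => d.insert p.2 p.1) d).getD l dflt
      = d.getD l dflt := by
  intro R
  induction R with
  | nil => intro s d l h; simp [PySem.List.enumerate_nil]
  | cons x R' ih =>
      intro s d l h
      rw [PySem.List.enumerate_cons, List.foldl_cons]
      rw [ih (s+1) _ l (fun hm => h (List.mem_cons_of_mem x hm))]
      exact PySem.Dict.getD_insert_of_ne d s dflt (fun he => h (he ▸ List.mem_cons_self))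

lemma pv_rank_getD (dflt : Int) :
    ∀ (R : List String) (s : Int) (d : PySem.Dict String Int) (l : String),
      R.Nodup → l ∈ R →
      ((PySem.List.enumerate R s).foldl (fun d p => d.insert p.2 p.1) d).getD l dflt
      = s + (R.idxOf l : Int) := by
  intro R
  induction R with
  | nil => intro s d l _ h; simp at h
  | cons x R' ih =>
      intro s d l hnd hl
      rw [PySem.List.enumerate_cons, List.foldl_cons]
      by_cases he : l = x
      · subst he
        rw [pv_rank_notmem dflt R' (s+1) _ l (List.nodup_cons.mp hnd).1]
        rw [PySem.Dict.getD_insert_self]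
        simp
      · have hl' : l ∈ R' := (List.mem_cons.mp hl).resolve_left he
        rw [ih (s+1) _ l (List.nodup_cons.mp hnd).2 hl']
        rw [List.idxOf_cons_ne _ (fun h2 => he h2.symm)]
        push_cast
        ring

-- B's per-list key equals pvKey
lemma pv_minkey (R : List String) (ll : List String) (h : ∀ l ∈ ll, l ∈ R) :
    ((PySem.List.min? (ll.map (fun lbl => (R.idxOf lbl : Int))) (fun x => x)).getD
        (R.length : Int)).toNat
    = pvKey R ll := by
  rcases eq_or_ne ll [] with rfl | hne
  · have : pvKey R [] = R.length := (pvKey_eq_length_iff R []).mpr (by simp)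
    simp [PySem.List.min?, this]
  · cases hm : PySem.List.min? (ll.map (fun lbl => (R.idxOf lbl : Int))) (fun x => x) with
    | none =>
        rw [PySem.List.min?_eq_none_iff] at hm
        simp [hne] at hm
    | some m =>
        obtain ⟨l1, hl1, he1⟩ := List.mem_map.mp (PySem.List.min?_mem hm)
        obtain ⟨lw, hlw, hew⟩ := pvKey_witness R ll h hne
        have h1 : m ≤ (pvKey R ll : Int) := by
          have := PySem.List.min?_isMin hm ((R.idxOf lw : Int)) (List.mem_map.mpr ⟨lw, hlw, rfl⟩)
          simpa [hew] using this
        have h2 : (pvKey R ll : Int) ≤ m := by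
          rw [← he1]
          exact_mod_cast pvKey_le_idxOf R ll l1 hl1
        have : m = (pvKey R ll : Int) := le_antisymm h1 h2
        simp [this]

-- the label order: no duplicates, and it contains exactly the labels that occur
lemma pv_order_nodup (labels_lists : List (List String)) : (pvOrder labels_lists).Nodup := by
  unfold pvOrder
  rw [List.nodup_reverse]
  have hperm := (PySem.List.sorted_perm
    (PySem.Dict.counter (labels_lists.flatMap (fun labels_list => labels_list))).items
    (fun p => p.2) true).map (·.1)
  rw [hperm.nodup_iff, PySem.Dict.items_counter, List.map_map]
  rw [show ((fun (x : String × Int) => x.1) ∘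
      fun k => (k, ((labels_lists.flatMap (fun labels_list => labels_list)).count k : Int))) = id
    from funext (fun x => rfl)]
  rw [List.map_id]
  exact PySem.Set.nodup_ofList _

lemma pv_mem_order (labels_lists : List (List String)) (l : String) :
    l ∈ pvOrder labels_lists ↔ l ∈ labels_lists.flatMap (fun labels_list => labels_list) := by
  unfold pvOrder
  rw [List.mem_reverse]
  have hperm := (PySem.List.sorted_perm
    (PySem.Dict.counter (labels_lists.flatMap (fun labels_list => labels_list))).items
    (fun p => p.2) true).map (·.1)
  rw [hperm.mem_iff, PySem.Dict.items_counter]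
  simp [List.map_map, PySem.Set.mem_ofList]

lemma pv_enumerate_nodup (labels_lists : List (List String)) :
    (PySem.List.enumerate labels_lists (0 : Int)).Nodup :=
  (PySem.List.pairwise_lt_enumerate labels_lists 0).imp
    (fun h e => absurd (e ▸ h) (lt_irrefl _))

lemma pv_mem_labels (labels_lists : List (List String)) (t : Int × List String)
    (ht : t ∈ PySem.List.enumerate labels_lists (0 : Int)) (l : String) (hl : l ∈ t.2) :
    l ∈ pvOrder labels_lists := by
  rw [pv_mem_order]
  obtain ⟨k, hk, rfl⟩ := (PySem.List.mem_enumerate_iff labels_lists 0 t).mp ht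
  exact List.mem_flatMap.mpr ⟨labels_lists[k], List.getElem_mem hk, hl⟩

-- helper: the drain loop from its own start state
lemma pv_drain' (c : List (Int × List String)) (si : List Int) (h : c.Nodup) :
    c.foldl (fun st' t => (st'.1 ++ [t.1], (PySem.List.remove? st'.2 t).getD st'.2)) (si, c)
    = (si ++ c.map (·.1), []) := by
  have := pv_drain c [] si (by simpa using h)
  simpa using this

-- A computes the canonical value
lemma pv_A_eq (labels_lists : List (List String)) :
    argsort_by_label_freq labels_lists = pvCanon labels_lists := by
  have hnd := pv_enumerate_nodup labels_lists
  have h1 := pv_outer'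
      ((PySem.List.sorted
          (PySem.Dict.counter (labels_lists.flatMap (fun labels_list => labels_list))).items
          (fun p => p.2) true).reverse)
      (PySem.List.enumerate labels_lists) [] hnd
  rw [show argsort_by_label_freq labels_lists
      = (fun st : List Int × List (Int × List String) =>
          (st.2.foldl (fun st' t => (st'.1 ++ [t.1], (PySem.List.remove? st'.2 t).getD st'.2))
            (st.1, st.2)).1)
        (((PySem.List.sorted
            (PySem.Dict.counter (labels_lists.flatMap (fun labels_list => labels_list))).items
            (fun p => p.2) true).reverse).foldl
          (fun st lp =>
            st.2.foldl
              (fun st' t =>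
                if lp.1 ∈ t.2 then (st'.1 ++ [t.1], (PySem.List.remove? st'.2 t).getD st'.2)
                else st')
              (st.1, st.2))
          (([] : List Int), PySem.List.enumerate labels_lists)) from rfl]
  rw [h1]
  simp only [List.nil_append]
  rw [pv_drain' _ _ (hnd.filter _)]
  simp only [List.map_reverse]
  rw [pvEmit_eq_flatMap]
  unfold pvCanon
  rw [List.range_succ, List.flatMap_append]
  simp only [List.flatMap_cons, List.flatMap_nil, List.append_nil]
  rfl

-- B computes the canonical value
lemma pv_B_eq (labels_lists : List (List String)) :
    argsort_by_label_freq_alt labels_lists = pvCanon labels_lists := by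
  have hord := pv_order_nodup labels_lists
  have hkeq : ∀ t ∈ PySem.List.enumerate labels_lists (0 : Int),
      ((PySem.List.min? (t.2.map (fun lbl =>
          ((PySem.List.enumerate (pvOrder labels_lists)).foldl
            (fun d p => d.insert p.2 p.1) PySem.Dict.empty).getD lbl
            ((pvOrder labels_lists).length : Int)))
        (fun x => x)).getD ((pvOrder labels_lists).length : Int)).toNat
      = pvKey (pvOrder labels_lists) t.2 := by
    intro t ht
    have hcg : t.2.map (fun lbl =>
        ((PySem.List.enumerate (pvOrder labels_lists)).foldl
          (fun d p => d.insert p.2 p.1) PySem.Dict.empty).getD lbl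
          ((pvOrder labels_lists).length : Int))
        = t.2.map (fun lbl => ((pvOrder labels_lists).idxOf lbl : Int)) :=
      List.map_congr_left (fun l hl => by
        rw [pv_rank_getD ((pvOrder labels_lists).length : Int) (pvOrder labels_lists) 0
          PySem.Dict.empty l hord (pv_mem_labels labels_lists t ht l hl)]
        ring)
    rw [hcg]
    exact pv_minkey (pvOrder labels_lists) t.2
      (fun l hl => pv_mem_labels labels_lists t ht l hl)
  rw [show argsort_by_label_freq_alt labels_lists
      = ((PySem.List.enumerate labels_lists).foldl
          (fun b t => b.modify
            (((PySem.List.min? (t.2.map (fun lbl =>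
                ((PySem.List.enumerate (pvOrder labels_lists)).foldl
                  (fun d p => d.insert p.2 p.1) PySem.Dict.empty).getD lbl
                  ((pvOrder labels_lists).length : Int)))
              (fun x => x)).getD ((pvOrder labels_lists).length : Int)).toNat)
            (fun bs => bs ++ [t.1]))
          (List.replicate ((pvOrder labels_lists).length + 1) [])).flatten from rfl]
  rw [pv_buckets _ _ _ (fun t ht => by
    rw [List.length_replicate, hkeq t ht]
    exact Nat.lt_succ_of_le (pvKey_le _ _))]
  rw [List.length_replicate]
  rw [← List.flatMap_def]
  unfold pvCanon
  apply List.flatMap_congr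
  intro r hr
  rw [List.getD_replicate ([] : List Int) (List.mem_range.mp hr), List.nil_append]
  apply congrArg
  apply List.filter_congr
  intro t ht
  rw [hkeq t ht]

-- ===== VERDICT (by name: the statement is the Claim_ definition above) =====
theorem argsort_by_label_freq_spec : Claim_equal_argsort_by_label_freq := by
  intro labels_lists _
  unfold Spec_argsort_by_label_freq
  rw [pv_A_eq, pv_B_eq]
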